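-- pv_equiv track=rewrite | github.com/amaotone/competitive-programming | GoogleCodeJam/2018Qual/saving_the_universe_again.py | calc
-- ===== SOURCE A (Python) =====
-- def calc(P):
--     ans = 0
--     damage = 1
--     for c in P:
--         if c=='S':
--             ans += damage
--         elif c=='C':
--             damage *= 2
--     return ans
-- ===== SOURCE B (Python) =====
-- def calc(P):
--     # Pass 1: prefix count of 'C' before each position.
--     prefix = []
--     c = 0
--     for ch in P:
--         prefix.append(c)
--         if ch == 'C':
--             c += 1
--     # Pass 2: evaluate 2**count at each 'S' position.
--     return sum(2 ** k for ch, k in zip(P, prefix) if ch == 'S')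
-- ===== Notes on version B (the rewrite author's own statement) =====
-- stated objective: alternative
-- what changed: Replaces the single interleaved loop with a doubling damage accumulator by two separate passes: first a prefix table of 'C' counts, then a sum of 2**count over the 'S' positions.
import Mathlib
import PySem

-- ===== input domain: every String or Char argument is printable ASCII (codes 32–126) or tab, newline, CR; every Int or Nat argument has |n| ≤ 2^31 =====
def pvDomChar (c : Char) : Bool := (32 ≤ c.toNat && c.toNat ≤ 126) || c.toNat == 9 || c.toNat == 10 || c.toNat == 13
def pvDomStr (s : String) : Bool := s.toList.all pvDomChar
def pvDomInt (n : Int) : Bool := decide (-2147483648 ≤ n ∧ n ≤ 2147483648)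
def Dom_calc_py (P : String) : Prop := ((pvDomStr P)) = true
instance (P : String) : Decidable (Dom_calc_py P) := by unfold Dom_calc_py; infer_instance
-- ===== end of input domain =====

-- B replaces A's interleaved loop (running damage doubled in place) by two passes:
-- a prefix table of 'C' counts, then a sum of 2^count over the 'S' positions. Objective: alternative.

-- ===== PORT A =====
def calc_py (P : String) : Int :=
  (P.toList.foldl
    (fun (s : Int × Int) (c : Char) =>
      if c = 'S' then (s.1 + s.2, s.2)
      else if c = 'C' then (s.1, s.2 * 2)
      else s)
    (0, 1)).1

-- ===== PORT B =====
-- prefix table: number of 'C' before each position, starting from k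
def calcPrefC : List Char → Nat → List Nat
  | [], _ => []
  | c :: cs, k => k :: calcPrefC cs (if c = 'C' then k + 1 else k)

def calc_py_alt (P : String) : Int :=
  ((P.toList.zip (calcPrefC P.toList 0)).foldl
    (fun (a : Int) (p : Char × Nat) => if p.1 = 'S' then a + 2 ^ p.2 else a)
    0)

-- ===== PRECONDITION & SPEC =====
def Spec_calc_py (P : String) (out : Int) : Prop := out = calc_py_alt P
instance (P : String) (out : Int) : Decidable (Spec_calc_py P out) := by unfold Spec_calc_py; infer_instance

-- ===== CLAIM (what is proved, stated in full; the proofs are below) =====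
def Claim_equal_calc_py : Prop := ∀ (P : String), Dom_calc_py P → Spec_calc_py P (calc_py P)

-- ===== LEMMAS AND PROOFS =====
theorem calc_key (l : List Char) : ∀ (ans : Int) (k : Nat),
    (l.foldl
      (fun (s : Int × Int) (c : Char) =>
        if c = 'S' then (s.1 + s.2, s.2)
        else if c = 'C' then (s.1, s.2 * 2)
        else s)
      (ans, 2 ^ k)).1
    = (l.zip (calcPrefC l k)).foldl
        (fun (a : Int) (p : Char × Nat) => if p.1 = 'S' then a + 2 ^ p.2 else a)
        ans := by
  induction l with
  | nil => intro ans k; simp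
  | cons c cs ih =>
    intro ans k
    by_cases hS : c = 'S'
    · simp [calcPrefC, hS, ih]
    · by_cases hC : c = 'C'
      · have : (2 : Int) ^ k * 2 = 2 ^ (k + 1) := by ring
        simp [calcPrefC, hC, this, ih]
      · simp [calcPrefC, hS, hC, ih]

-- ===== VERDICT (by name: the statement is the Claim_ definition above) =====
theorem calc_py_spec : Claim_equal_calc_py := by
  intro P _
  show calc_py P = calc_py_alt P
  have := calc_key P.toList 0 0
  simpa [calc_py, calc_py_alt] using this
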